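-- pv_equiv track=rewrite | github.com/CSKIM999/Algorithm-test | Programmers/자동완성.py | solution
-- ===== SOURCE A (Python) =====
-- class trie:
--     def __init__(self):
--         self.root = {}
--
--     def insert(self, string):
--         cur_node = self.root
--         for current in string:
--             if current not in cur_node:
--                 cur_node[current] = {"count": 0}
--             cur_node[current]["count"] += 1
--             cur_node = cur_node[current]
--
--     def check(self, string):
--         cur_node = self.root
--         count = 0
--         for current in string:
--             cur_node = cur_node[current]
--             count += 1
--             if cur_node["count"] == 1:
--                 return count
--         return count
--
-- def solution(words):
--     answer = 0
--     t = trie()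
--     for word in words:
--         t.insert(word)
--     for word in words:
--         answer += t.check(word)
--
--     return answer
-- ===== SOURCE B (Python) =====
-- def _lcp(a, b):
--     n = 0
--     for x, y in zip(a, b):
--         if x != y:
--             break
--         n += 1
--     return n
--
-- def solution(words):
--     total = 0
--     for i, w in enumerate(words):
--         best = 0
--         for j, v in enumerate(words):
--             if j != i:
--                 best = max(best, _lcp(w, v))
--         total += min(len(w), best + 1)
--     return total
-- ===== Notes on version B (the rewrite author's own statement) =====
-- stated objective: alternative
-- what changed: Replaces the trie with counted nodes by a direct pairwise scan: each word contributes min(len(word), 1 + max longest-common-prefix with any other list element), no data structure at all.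
import Mathlib
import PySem

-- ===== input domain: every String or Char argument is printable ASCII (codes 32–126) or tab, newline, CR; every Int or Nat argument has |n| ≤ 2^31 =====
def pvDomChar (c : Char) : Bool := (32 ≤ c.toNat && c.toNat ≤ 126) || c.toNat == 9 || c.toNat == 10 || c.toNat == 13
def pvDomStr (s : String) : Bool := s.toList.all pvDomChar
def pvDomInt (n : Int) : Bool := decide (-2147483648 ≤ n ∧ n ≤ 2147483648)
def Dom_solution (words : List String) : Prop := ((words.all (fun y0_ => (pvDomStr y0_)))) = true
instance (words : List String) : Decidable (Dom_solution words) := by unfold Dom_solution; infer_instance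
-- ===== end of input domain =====

-- B replaces A's counted trie by a direct pairwise longest-common-prefix scan (alternative algorithm, no data structure).

-- ===== PORT A =====
-- The trie: nested Python dicts {"count": n, <char>: subdict, …}; modelled as a
-- mutual pair (no nested inductive): a node = count + ordered child list.
mutual
inductive PNode : Type where
  | mk : Int → PChildren → PNode
inductive PChildren : Type where
  | nil : PChildren
  | cons : Char → PNode → PChildren → PChildren
end

-- first-match lookup among the children (dict lookup)
def findC : PChildren → Char → Option PNode
  | PChildren.nil, _ => none
  | PChildren.cons c' n t, c => if c' = c then some n else findC t c

-- locate (or append) the child for character c, bump its count, and apply f below it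
def insAt (f : PChildren → PChildren) : PChildren → Char → PChildren
  | PChildren.nil, c => PChildren.cons c (PNode.mk 1 (f PChildren.nil)) PChildren.nil
  | PChildren.cons c' (PNode.mk k ch) t, c =>
      if c' = c then PChildren.cons c' (PNode.mk (k + 1) (f ch)) t
      else PChildren.cons c' (PNode.mk k ch) (insAt f t c)

-- trie.insert: walk the word, creating missing nodes with count 0, then count += 1 and descend
def ins : PChildren → List Char → PChildren
  | t, [] => t
  | t, c :: rest => insAt (fun ch => ins ch rest) t c

-- trie.check: walk the word counting steps, return early at the first node with count 1
def check : PChildren → List Char → Int → Int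
  | _, [], cnt => cnt
  | t, c :: rest, cnt =>
      match findC t c with
      | none => cnt  -- unreachable when the word was inserted (Python would raise KeyError)
      | some (PNode.mk k ch) => if k = 1 then cnt + 1 else check ch rest (cnt + 1)

def solution (words : List String) : Int :=
  let root := words.foldl (fun t w => ins t w.toList) PChildren.nil
  words.foldl (fun answer word => answer + check root word.toList 0) 0

-- ===== PORT B =====
-- _lcp: length of the longest common prefix
def lcp : List Char → List Char → Nat
  | x :: xs, y :: ys => if x = y then lcp xs ys + 1 else 0
  | _, _ => 0

-- inner loop: best = max over j ≠ i of _lcp(w, words[j])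
def bestOther (i : Int) (w : List Char) (e : List (Int × String)) : Nat :=
  e.foldl (fun best jv => if jv.1 ≠ i then max best (lcp w jv.2.toList) else best) 0

def solution_alt (words : List String) : Int :=
  (PySem.List.enumerate words).foldl
    (fun total iw =>
      total + ↑(min iw.2.toList.length (bestOther iw.1 iw.2.toList (PySem.List.enumerate words) + 1)))
    0

-- ===== PRECONDITION & SPEC =====
def Spec_solution (words : List String) (out : Int) : Prop := out = solution_alt words
instance (words : List String) (out : Int) : Decidable (Spec_solution words out) := by unfold Spec_solution; infer_instance

-- ===== CLAIM (what is proved, stated in full; the proofs are below) =====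
def Claim_equal_solution : Prop := ∀ (words : List String), Dom_solution words → Spec_solution words (solution words)

-- ===== LEMMAS AND PROOFS =====

-- count stored at the node reached by a nonempty path (0 if absent)
def getCount : PChildren → List Char → Int
  | _, [] => 0
  | t, c :: p =>
      match findC t c with
      | none => 0
      | some (PNode.mk k ch) => if p = [] then k else getCount ch p

theorem findC_insAt (f : PChildren → PChildren) (t : PChildren) (d : Char) (c : Char) :
    findC (insAt f t d) c =
      if d = c then
        some (match findC t d with
              | none => PNode.mk 1 (f PChildren.nil)
              | some (PNode.mk k ch) => PNode.mk (k + 1) (f ch))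
      else findC t c := by
  match t with
  | PChildren.nil =>
      by_cases h : d = c <;> simp [insAt, findC, h]
  | PChildren.cons c' (PNode.mk k ch) t' =>
      by_cases h1 : c' = d
      · subst h1
        by_cases h2 : c' = c <;> simp [insAt, findC, h2]
      · by_cases h2 : c' = c
        · have hdc : ¬ d = c := fun h => h1 (h2.trans h.symm)
          have hcd : ¬ c = d := fun h => hdc h.symm
          simp [insAt, findC, h2, hdc, hcd]
        · simp [insAt, findC, h1, h2, findC_insAt f t' d c]

theorem getCount_nil (p : List Char) : getCount PChildren.nil p = 0 := by
  cases p <;> simp [getCount, findC]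

theorem getCount_cons_none (t : PChildren) (c : Char) (p : List Char)
    (h : findC t c = none) : getCount t (c :: p) = 0 := by
  simp [getCount, h]

theorem getCount_cons_some (t : PChildren) (c : Char) (p : List Char) (k : Int) (ch : PChildren)
    (h : findC t c = some (PNode.mk k ch)) (hp : p ≠ []) : getCount t (c :: p) = getCount ch p := by
  simp [getCount, h, hp]

theorem getCount_single_some (t : PChildren) (c : Char) (k : Int) (ch : PChildren)
    (h : findC t c = some (PNode.mk k ch)) : getCount t [c] = k := by
  simp [getCount, h]

theorem getCount_ins (w : List Char) : ∀ (t : PChildren) (p : List Char), p ≠ [] →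
    getCount (ins t w) p = getCount t p + (if p <+: w then 1 else 0) := by
  match w with
  | [] =>
      intro t p hp
      have : ¬ p <+: ([] : List Char) := by simpa using hp
      simp [ins, this]
  | d :: w' =>
      intro t p hp
      match p with
      | [] => exact absurd rfl hp
      | c :: p' =>
        show getCount (insAt (fun ch => ins ch w') t d) (c :: p') = _
        by_cases hdc : d = c
        · subst hdc
          have hpre1 : [d] <+: d :: w' := by simp
          cases hf : findC t d with
          | none =>
            have hfi : findC (insAt (fun ch => ins ch w') t d) d = some (PNode.mk 1 (ins PChildren.nil w')) := by
              simp [findC_insAt, hf]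
            match p' with
            | [] =>
                rw [getCount_single_some _ _ _ _ hfi, getCount_cons_none _ _ _ hf]
                simp [hpre1]
            | e :: p'' =>
                have hpe : (e :: p'') ≠ ([] : List Char) := by simp
                rw [getCount_cons_some _ _ _ _ _ hfi hpe, getCount_cons_none _ _ _ hf,
                  getCount_ins w' PChildren.nil (e :: p'') hpe, getCount_nil]
                have hiff : (d :: e :: p'') <+: (d :: w') ↔ (e :: p'') <+: w' := by
                  simp [List.cons_prefix_cons]
                simp [hiff]
          | some n =>
            match n with
            | PNode.mk k ch =>
              have hfi : findC (insAt (fun ch => ins ch w') t d) d = some (PNode.mk (k + 1) (ins ch w')) := by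
                simp [findC_insAt, hf]
              match p' with
              | [] =>
                  rw [getCount_single_some _ _ _ _ hfi, getCount_single_some _ _ _ _ hf]
                  simp [hpre1]
              | e :: p'' =>
                  have hpe : (e :: p'') ≠ ([] : List Char) := by simp
                  rw [getCount_cons_some _ _ _ _ _ hfi hpe, getCount_cons_some _ _ _ _ _ hf hpe,
                    getCount_ins w' ch (e :: p'') hpe]
                  have hiff : (d :: e :: p'') <+: (d :: w') ↔ (e :: p'') <+: w' := by
                    simp [List.cons_prefix_cons]
                  simp [hiff]
        · have hpre : ¬ (c :: p') <+: (d :: w') := fun h => hdc (List.cons_prefix_cons.mp h).1.symm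
          have hfi : findC (insAt (fun ch => ins ch w') t d) c = findC t c := by
            simp [findC_insAt, hdc]
          cases hf : findC t c with
          | none =>
              rw [getCount_cons_none _ _ _ (hfi.trans hf), getCount_cons_none _ _ _ hf]
              simp [hpre]
          | some n =>
            match n, p' with
            | PNode.mk k ch, [] =>
                rw [getCount_single_some _ _ _ _ (hfi.trans hf), getCount_single_some _ _ _ _ hf]
                simp [hpre]
            | PNode.mk k ch, e :: p'' =>
                have hpe : (e :: p'') ≠ ([] : List Char) := by simp
                rw [getCount_cons_some _ _ _ _ _ (hfi.trans hf) hpe,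
                  getCount_cons_some _ _ _ _ _ hf hpe]
                simp [hpre]

theorem getCount_foldl (wss : List (List Char)) (t : PChildren) (p : List Char) (hp : p ≠ []) :
    getCount (wss.foldl ins t) p = getCount t p + (wss.countP (fun v => p <+: v) : Int) := by
  induction wss generalizing t with
  | nil => simp
  | cons w wss ih =>
      rw [List.foldl_cons, ih (ins t w), getCount_ins w t p hp, List.countP_cons]
      by_cases h : p <+: w <;> simp [h] <;> omega

-- check characterised: if along w the count equals 1 exactly below depth M+1,
-- check returns acc + min |w| (M+1)
theorem check_spec (w : List Char) : ∀ (t : PChildren) (acc : Int) (M : Nat),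
    (∀ k, 1 ≤ k → k ≤ w.length → 1 ≤ getCount t (w.take k)) →
    (∀ k, 1 ≤ k → k ≤ w.length → (getCount t (w.take k) = 1 ↔ M < k)) →
    check t w acc = acc + ↑(min w.length (M + 1)) := by
  match w with
  | [] => intro t acc M h1 h2; simp [check]
  | c :: rest =>
      intro t acc M h1 h2
      have hlen : 1 ≤ (c :: rest).length := by simp
      have h1c := h1 1 le_rfl hlen
      have h2c := h2 1 le_rfl hlen
      simp only [List.take_succ_cons, List.take_zero] at h1c h2c
      cases hf : findC t c with
      | none => rw [getCount_cons_none _ _ _ hf] at h1c; omega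
      | some n =>
        match n with
        | PNode.mk k1 ch =>
          rw [getCount_single_some _ _ _ _ hf] at h1c h2c
          rw [show check t (c :: rest) acc
                = if k1 = 1 then acc + 1 else check ch rest (acc + 1) from by
              simp [check, hf]]
          match M with
          | 0 =>
              have : k1 = 1 := h2c.mpr (by omega)
              simp [this]
          | M' + 1 =>
              rw [if_neg (fun h => by have := h2c.mp h; omega)]
              have hstep : ∀ (j : Nat), 1 ≤ j → j ≤ rest.length →
                  getCount ch (rest.take j) = getCount t ((c :: rest).take (j + 1)) := by
                intro j hj1 hj2
                have hne : rest.take j ≠ [] := by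
                  intro hcon
                  rcases List.take_eq_nil_iff.mp hcon with h | h
                  · omega
                  · rw [h] at hj2; simp at hj2; omega
                rw [List.take_succ_cons, getCount_cons_some _ _ _ _ _ hf hne]
              rw [check_spec rest ch (acc + 1) M'
                (by
                  intro j hj1 hj2
                  rw [hstep j hj1 hj2]
                  exact h1 (j + 1) (by omega) (by simpa using hj2))
                (by
                  intro j hj1 hj2
                  rw [hstep j hj1 hj2]
                  rw [h2 (j + 1) (by omega) (by simpa using hj2)]
                  omega)]
              have : min (c :: rest).length (M' + 1 + 1) = min rest.length (M' + 1) + 1 := by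
                simp only [List.length_cons]
                omega
              rw [this]
              push_cast
              ring

theorem lcp_iff (a b : List Char) (k : Nat) :
    k ≤ lcp a b ↔ (k ≤ a.length ∧ a.take k = b.take k) := by
  induction a generalizing b k with
  | nil =>
      match k with
      | 0 => simp
      | k + 1 => simp [lcp]
  | cons x xs ih =>
      match b, k with
      | _, 0 => simp
      | [], k + 1 => simp [lcp]
      | y :: ys, k + 1 =>
          by_cases hxy : x = y
          · subst hxy
            simp only [lcp, if_true, List.take_succ_cons, List.length_cons, List.cons.injEq,
              true_and, Nat.add_le_add_iff_right, ih ys k]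
          · simp [lcp, hxy]

theorem countP_one (l : List (Int × List Char)) (i : Int) (w : List Char)
    (hnd : l.Pairwise (fun p q => p.1 < q.1)) (h : (i, w) ∈ l)
    (g : List Char → Bool) (hgw : g w = true) :
    (l.countP (fun x => g x.2) = 1 ↔ ∀ x ∈ l, x.1 ≠ i → g x.2 = false) := by
  induction l with
  | nil => simp at h
  | cons y l ih =>
    have hpc := List.pairwise_cons.mp hnd
    rcases List.mem_cons.mp h with hy | hmem
    · have hylt : ∀ x ∈ l, x.1 ≠ i := by
        intro x hx
        have := hpc.1 x hx
        rw [← hy] at this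
        exact fun he => by rw [he] at this; exact lt_irrefl _ this
      rw [List.countP_cons]
      have hgy : g y.2 = true := by rw [← hy]; exact hgw
      simp only [hgy, if_pos]
      constructor
      · intro hc x hx hxne
        rcases List.mem_cons.mp hx with rfl | hxl
        · exact absurd (by rw [← hy]) hxne
        · have h0 : l.countP (fun x => g x.2) = 0 := by omega
          have := List.countP_eq_zero.mp h0 x hxl
          simpa using this
      · intro hall
        have h0 : l.countP (fun x => g x.2) = 0 := by
          apply List.countP_eq_zero.mpr
          intro x hx
          simp [hall x (List.mem_cons_of_mem _ hx) (hylt x hx)]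
        omega
    · have hy1 : y.1 ≠ i := by
        have := hpc.1 _ hmem
        exact fun he => by rw [he] at this; exact lt_irrefl _ this
      rw [List.countP_cons]
      by_cases hgy : g y.2 = true
      · have hpos : 0 < l.countP (fun x => g x.2) :=
          List.countP_pos_iff.mpr ⟨(i, w), hmem, by simpa using hgw⟩
        apply iff_of_false
        · simp only [hgy, if_pos]; omega
        · intro hall
          have := hall y (List.mem_cons_self) hy1
          rw [hgy] at this
          simp at this
      · have hgy' : g y.2 = false := by simpa using hgy
        simp only [hgy', Bool.false_eq_true, Nat.add_zero, if_false]
        rw [ih hpc.2 hmem]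
        constructor
        · intro hall x hx hxne
          rcases List.mem_cons.mp hx with rfl | hxl
          · exact hgy'
          · exact hall x hxl hxne
        · intro hall x hx hxne
          exact hall x (List.mem_cons_of_mem _ hx) hxne


theorem foldl_max_lt (i : Int) (w : List Char) (K : Nat) :
    ∀ (e : List (Int × String)) (b : Nat),
    (e.foldl (fun best jv => if jv.1 ≠ i then max best (lcp w jv.2.toList) else best) b < K ↔
      b < K ∧ ∀ jv ∈ e, jv.1 ≠ i → lcp w jv.2.toList < K) := by
  intro e
  induction e with
  | nil => simp
  | cons jv e ih =>
      intro b
      rw [List.foldl_cons]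
      by_cases hj : jv.1 ≠ i
      · rw [if_pos hj, ih]
        constructor
        · rintro ⟨hb, hall⟩
          exact ⟨by omega, fun x hx hxi => by
            rcases List.mem_cons.mp hx with rfl | hxl
            · omega
            · exact hall x hxl hxi⟩
        · rintro ⟨hb, hall⟩
          exact ⟨by have := hall jv List.mem_cons_self hj; omega,
            fun x hx hxi => hall x (List.mem_cons_of_mem _ hx) hxi⟩
      · rw [if_neg hj, ih]
        constructor
        · rintro ⟨hb, hall⟩
          exact ⟨hb, fun x hx hxi => by
            rcases List.mem_cons.mp hx with rfl | hxl
            · exact absurd hxi hj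
            · exact hall x hxl hxi⟩
        · rintro ⟨hb, hall⟩
          exact ⟨hb, fun x hx hxi => hall x (List.mem_cons_of_mem _ hx) hxi⟩

theorem foldl_add_map {α : Type} (l : List α) (f : α → Int) :
    ∀ (a : Int), l.foldl (fun s x => s + f x) a = a + (l.map f).sum := by
  induction l with
  | nil => simp
  | cons x l ih => intro a; simp [ih]; ring

-- the per-word equality: A's trie walk = B's pairwise-lcp formula
theorem perWord (words : List String) (i : Int) (w : String)
    (hmem : (i, w) ∈ PySem.List.enumerate words) :
    check (words.foldl (fun t v => ins t v.toList) PChildren.nil) w.toList 0 =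
      ↑(min w.toList.length (bestOther i w.toList (PySem.List.enumerate words) + 1)) := by
  set e := PySem.List.enumerate words with he
  set lp := e.map (fun p => (p.1, p.2.toList)) with hlp
  set root := words.foldl (fun t v => ins t v.toList) PChildren.nil with hroot
  have hndlp : lp.Pairwise (fun p q => p.1 < q.1) := by
    exact List.Pairwise.map _ (fun a b h => h) (PySem.List.pairwise_lt_enumerate words 0)
  have hmemlp : (i, w.toList) ∈ lp := List.mem_map.mpr ⟨(i, w), hmem, rfl⟩
  have hcount : ∀ (k : Nat), 1 ≤ k → k ≤ w.toList.length →
      getCount root (w.toList.take k) =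
        (lp.countP (fun x => decide (w.toList.take k <+: x.2)) : Int) := by
    intro k hk1 hk2
    have hne : w.toList.take k ≠ [] := by
      intro hcon
      rcases List.take_eq_nil_iff.mp hcon with h | h
      · omega
      · rw [h] at hk2; simp at hk2; omega
    have h1 : root = (words.map String.toList).foldl ins PChildren.nil := by
      rw [hroot, List.foldl_map]
    rw [h1, getCount_foldl _ _ _ hne, getCount_nil, zero_add]
    congr 1
    rw [List.countP_map, hlp, List.countP_map, he]
    conv_lhs => rw [← PySem.List.map_snd_enumerate words 0, List.countP_map]
    rfl
  have hprefix : ∀ (k : Nat), 1 ≤ k → k ≤ w.toList.length → ∀ (v : List Char),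
      (decide (w.toList.take k <+: v) = false ↔ lcp w.toList v < k) := by
    intro k hk1 hk2 v
    have hlen : (w.toList.take k).length = k := by
      rw [List.length_take]; omega
    have : w.toList.take k <+: v ↔ k ≤ lcp w.toList v := by
      rw [List.prefix_iff_eq_take, hlen, lcp_iff]
      constructor
      · intro h; exact ⟨hk2, h⟩
      · intro h; exact h.2
    simp only [decide_eq_false_iff_not, this]
    omega
  rw [check_spec w.toList root 0 (bestOther i w.toList e)
    (by
      intro k hk1 hk2
      rw [hcount k hk1 hk2]
      have : 0 < lp.countP (fun x => decide (w.toList.take k <+: x.2)) :=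
        List.countP_pos_iff.mpr ⟨(i, w.toList), hmemlp, by
          simp [List.take_prefix]⟩
      omega)
    (by
      intro k hk1 hk2
      rw [hcount k hk1 hk2]
      have hone := countP_one lp i w.toList hndlp hmemlp
        (fun v => decide (w.toList.take k <+: v)) (by simp [List.take_prefix])
      have hcast : (lp.countP (fun x => decide (w.toList.take k <+: x.2)) : Int) = 1 ↔
          lp.countP (fun x => decide (w.toList.take k <+: x.2)) = 1 := by omega
      rw [hcast, hone]
      have hmemiff : (∀ x ∈ lp, x.1 ≠ i → decide (w.toList.take k <+: x.2) = false) ↔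
          (∀ jv ∈ e, jv.1 ≠ i → lcp w.toList jv.2.toList < k) := by
        constructor
        · intro hall jv hjv hne
          rw [← hprefix k hk1 hk2]
          exact hall (jv.1, jv.2.toList) (List.mem_map.mpr ⟨jv, hjv, rfl⟩) hne
        · intro hall x hx hne
          rcases List.mem_map.mp hx with ⟨jv, hjv, rfl⟩
          rw [hprefix k hk1 hk2]
          exact hall jv hjv hne
      rw [hmemiff]
      exact ((foldl_max_lt i w.toList k e 0).trans (and_iff_right (by omega))).symm)]
  rw [zero_add]

-- ===== VERDICT (by name: the statement is the Claim_ definition above) =====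
theorem solution_spec : Claim_equal_solution := by
  intro words _
  show solution words = solution_alt words
  rw [solution, solution_alt]
  rw [foldl_add_map, foldl_add_map, zero_add, zero_add]
  congr 1
  apply List.ext_getElem
  · simp [PySem.List.length_enumerate]
  · intro n h1 h2
    have hn : n < words.length := by simpa using h1
    have hne : n < (PySem.List.enumerate words).length := by
      simpa [PySem.List.length_enumerate] using hn
    simp only [List.getElem_map, PySem.List.getElem_enumerate]
    exact perWord words (0 + n) (words[n]'hn) (by
      rw [show ((0 + n : Int), words[n]'hn) = (PySem.List.enumerate words)[n]'hne from
        (PySem.List.getElem_enumerate _ _ _ _).symm]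
      exact List.getElem_mem _)
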